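-- pv_equiv track=rewrite | github.com/UmaRathore/Python_Programming_Exercises | best_time_sell_buy_stocks.py | func_calculates_difference
-- ===== SOURCE A (Python) =====
-- def func_calculates_difference(list_d):
--     new_list = []
--     for i in range(len(list_d) - 1):
--         new_list.append(list_d[i])
--     if max(new_list) == list_d[0]:
--         least_diff = min(new_list)
--     else:
--         least_diff = max(new_list)
--     return least_diff
-- ===== SOURCE B (Python) =====
-- def func_calculates_difference(list_d):
--     it = iter(list_d[:-1])
--     lo = hi = next(it)
--     for v in it:
--         if v < lo:
--             lo = v
--         if v > hi:
--             hi = v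
--     return lo if hi == list_d[0] else hi
-- ===== Notes on version B (the rewrite author's own statement) =====
-- stated objective: faster
-- what changed: Replaces building an intermediate prefix list with append and then scanning it up to three times with max()/min() by a single explicit pass that maintains running lo/hi accumulators (no intermediate list, one traversal).
import Mathlib
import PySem

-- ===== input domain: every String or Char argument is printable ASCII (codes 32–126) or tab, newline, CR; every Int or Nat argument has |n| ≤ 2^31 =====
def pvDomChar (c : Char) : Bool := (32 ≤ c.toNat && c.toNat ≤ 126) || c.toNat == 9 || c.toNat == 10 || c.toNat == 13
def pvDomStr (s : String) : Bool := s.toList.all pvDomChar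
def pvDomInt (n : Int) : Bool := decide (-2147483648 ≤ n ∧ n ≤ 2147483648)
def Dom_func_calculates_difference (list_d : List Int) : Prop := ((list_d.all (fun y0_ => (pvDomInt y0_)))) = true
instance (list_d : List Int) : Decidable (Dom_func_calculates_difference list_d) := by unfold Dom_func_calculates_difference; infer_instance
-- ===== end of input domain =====

-- B replaces the append-built prefix list and the separate max()/min() builtin scans
-- by one explicit pass keeping running lo/hi accumulators (alternative decomposition, same cost).


-- ===== PORT A =====
-- 'for i in range(len-1): new_list.append(list_d[i])', then max/min (none = ValueError, excluded by Pre_)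
def func_calculates_difference (list_d : List Int) : Int :=
  let new_list : List Int :=
    (PySem.List.pyRange 0 (PySem.List.len list_d - 1) 1).foldl
      (fun acc i => acc ++ [PySem.List.pyGetD list_d i 0]) []
  match PySem.List.max? new_list (fun y => y) with
  | none => 0  -- max([]) raises ValueError in Python; outside Pre_
  | some m =>
    if m = PySem.List.pyGetD list_d 0 0 then
      (PySem.List.min? new_list (fun y => y)).getD 0
    else m

-- ===== PORT B =====
-- lo = hi = next(iter(list_d[:-1])); one pass updating lo/hi; empty prefix raises (outside Pre_)
def func_calculates_difference_alt (list_d : List Int) : Int :=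
  match PySem.List.slice list_d none (some (-1)) with
  | [] => 0  -- next() on empty iterator raises StopIteration in Python; outside Pre_
  | x :: rest =>
    let p : Int × Int :=
      rest.foldl (fun p v =>
        ((if v < p.1 then v else p.1), (if v > p.2 then v else p.2))) (x, x)
    if p.2 = PySem.List.pyGetD list_d 0 0 then p.1 else p.2

-- ===== PRECONDITION & SPEC =====
-- A raises ValueError (max of empty prefix) when len(list_d) < 2; exactly those inputs are excluded.
def Pre_func_calculates_difference (list_d : List Int) : Prop := 2 ≤ list_d.length
instance (list_d : List Int) : Decidable (Pre_func_calculates_difference list_d) := by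
  unfold Pre_func_calculates_difference; infer_instance
def pvWitness_func_calculates_difference : List Int := [3, 1, 4]

def Spec_func_calculates_difference (list_d : List Int) (out : Int) : Prop := out = func_calculates_difference_alt list_d
instance (list_d : List Int) (out : Int) : Decidable (Spec_func_calculates_difference list_d out) := by unfold Spec_func_calculates_difference; infer_instance

-- ===== CLAIM (what is proved, stated in full; the proofs are below) =====
def Claim_equal_func_calculates_difference : Prop := ∀ (list_d : List Int), Dom_func_calculates_difference list_d → Pre_func_calculates_difference list_d → Spec_func_calculates_difference list_d (func_calculates_difference list_d)

-- ===== LEMMAS AND PROOFS =====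

-- A's appended prefix list is list_d.dropLast
lemma newlist_eq_dropLast (list_d : List Int) :
    (PySem.List.pyRange 0 (PySem.List.len list_d - 1) 1).foldl
      (fun acc i => acc ++ [PySem.List.pyGetD list_d i 0]) [] = list_d.dropLast := by
  rw [PySem.List.foldl_append_singleton_eq_map]
  rcases list_d with _ | ⟨h, t⟩
  · simp [PySem.List.len, PySem.List.pyRange]
  · have hlen : PySem.List.len (h :: t) - 1 = (PySem.List.len ((h :: t).dropLast)) := by
      simp [PySem.List.len]
    rw [hlen, show ([] : List Int) ++ _ = _ from List.nil_append _]
    have := PySem.List.map_pyGetD_pyRange_zero ((h :: t).dropLast) (0 : Int)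
    conv_rhs => rw [← this]
    apply List.map_congr_left
    intro j hj
    rw [PySem.List.mem_pyRange_one] at hj
    have hjl : j < ((h :: t).dropLast.length : Int) := by
      simpa [PySem.List.len] using hj.2
    rw [PySem.List.pyGetD_eq_getElem _ _ hj.1 hjl,
        PySem.List.pyGetD_eq_getElem _ _ hj.1 (lt_of_lt_of_le hjl (by simp))]
    exact (List.getElem_dropLast _).symm

-- B's combined fold is the pair of running-min and running-max folds
lemma fold_pair (x : Int) (rest : List Int) :
    rest.foldl (fun (p : Int × Int) v =>
        ((if v < p.1 then v else p.1), (if v > p.2 then v else p.2))) (x, x)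
      = (rest.foldl min x, rest.foldl max x) := by
  rw [PySem.List.foldl_prod_mk (f := fun lo v => if v < lo then v else lo)
        (g := fun hi v => if v > hi then v else hi)]
  have hmin : (fun (lo v : Int) => if v < lo then v else lo) = min := by
    funext a b; simp [min_def]; split_ifs <;> omega
  have hmax : (fun (hi v : Int) => if v > hi then v else hi) = max := by
    funext a b; simp [max_def]; split_ifs <;> omega
  rw [hmin, hmax]

theorem func_calculates_difference_spec : Claim_equal_func_calculates_difference := by
  intro list_d _ hpre
  unfold Spec_func_calculates_difference func_calculates_difference func_calculates_difference_alt
  rw [PySem.List.slice_to_neg_one]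
  rw [newlist_eq_dropLast]
  have hlen : list_d.dropLast ≠ [] := by
    intro h
    have := congrArg List.length h
    simp [Pre_func_calculates_difference] at this hpre
    omega
  obtain ⟨x, rest, hx⟩ := List.exists_cons_of_ne_nil hlen
  rw [hx]
  simp only [PySem.List.max?_id_cons, PySem.List.min?_id_cons, fold_pair]
  simp
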